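-- pv_equiv track=rewrite | github.com/jeremiah-c-leary/eda-log-file-warning-suppressor | elfws/vendor/mentor_graphics/questa_cdc__cdc_run_log.py | is_logfile
-- ===== SOURCE A (Python) =====
-- def is_logfile(lFile):
--     fToolFound = False
--     for iLineNumber, sLine in enumerate(lFile):
--         if fToolFound:
--            if sLine.startswith('log created'):
--                return True
--         if sLine.startswith('Command : cdc run'):
--             fToolFound = True
--         if iLineNumber == 20:
--             break
--     return False
-- ===== SOURCE B (Python) =====
-- def is_logfile(lFile):
--     # Take only the first 21 lines (indices 0..20), locate the first
--     # 'Command : cdc run' line, then check the remaining window for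
--     # a 'log created' line strictly after it.
--     lLines = [sLine for _, sLine in zip(range(21), lFile)]
--     iCmd = next((i for i, s in enumerate(lLines)
--                  if s.startswith('Command : cdc run')), None)
--     if iCmd is None:
--         return False
--     return any(s.startswith('log created') for s in lLines[iCmd + 1:])
-- ===== Notes on version B (the rewrite author's own statement) =====
-- stated objective: simpler
-- what changed: Replaces the stateful flag-carrying scan with a bounded slice of the first 21 lines, an index search for the first 'Command : cdc run' line and a plain any() over the lines after it.
import Mathlib
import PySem

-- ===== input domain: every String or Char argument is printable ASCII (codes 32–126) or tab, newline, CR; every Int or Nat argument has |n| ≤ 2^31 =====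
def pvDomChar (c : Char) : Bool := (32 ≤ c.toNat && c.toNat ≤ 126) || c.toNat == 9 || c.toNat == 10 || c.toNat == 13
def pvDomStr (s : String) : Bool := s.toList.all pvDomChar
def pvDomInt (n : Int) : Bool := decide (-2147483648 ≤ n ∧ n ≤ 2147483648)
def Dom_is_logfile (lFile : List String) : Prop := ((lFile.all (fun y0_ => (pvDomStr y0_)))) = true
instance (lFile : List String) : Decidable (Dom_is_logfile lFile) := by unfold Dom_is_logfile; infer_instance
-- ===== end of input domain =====

-- B replaces A's stateful flag-carrying scan by: take the first 21 lines, find the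
-- index of the first 'Command : cdc run' line, then scan the lines after it ('simpler').

-- ===== PORT A =====
-- the for-loop over enumerate(lFile) with the running flag, as a recursion carrying
-- the line index and the flag
def isLogfileLoopA : List String → Nat → Bool → Bool
  | [], _, _ => false
  | sLine :: rest, iLineNumber, fToolFound =>
    if fToolFound && PySem.Str.startswith sLine "log created" then
      true
    else
      let fToolFound' := if PySem.Str.startswith sLine "Command : cdc run" then true else fToolFound
      if iLineNumber == 20 then false
      else isLogfileLoopA rest (iLineNumber + 1) fToolFound'

def is_logfile (lFile : List String) : Bool :=
  isLogfileLoopA lFile 0 false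

-- ===== PORT B =====
-- next((i for i, s in enumerate(lLines) if s.startswith('Command : cdc run')), None)
def findCmdIdx : List String → Nat → Option Nat
  | [], _ => none
  | s :: rest, i =>
    if PySem.Str.startswith s "Command : cdc run" then some i
    else findCmdIdx rest (i + 1)

def is_logfile_alt (lFile : List String) : Bool :=
  let lLines := lFile.take 21                    -- [s for _, s in zip(range(21), lFile)]
  match findCmdIdx lLines 0 with
  | none => false
  | some iCmd =>                                 -- lLines[iCmd+1:] with a nonnegative index = drop
    (lLines.drop (iCmd + 1)).any (fun s => PySem.Str.startswith s "log created")

-- ===== PRECONDITION & SPEC =====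
def Spec_is_logfile (lFile : List String) (out : Bool) : Prop := out = is_logfile_alt lFile
instance (lFile : List String) (out : Bool) : Decidable (Spec_is_logfile lFile out) := by unfold Spec_is_logfile; infer_instance

-- ===== CLAIM (what is proved, stated in full; the proofs are below) =====
def Claim_equal_is_logfile : Prop := ∀ (lFile : List String), Dom_is_logfile lFile → Spec_is_logfile lFile (is_logfile lFile)

-- ===== LEMMAS AND PROOFS =====

-- shifting the start index of the command search
theorem findCmdIdx_succ (xs : List String) (i : Nat) :
    findCmdIdx xs (i + 1) = Option.map (· + 1) (findCmdIdx xs i) := by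
  induction xs generalizing i with
  | nil => rfl
  | cons s rest ih =>
    simp only [findCmdIdx]
    split_ifs with h
    · rfl
    · rw [ih (i + 1)]

-- once the flag is set, A just scans the remaining window for 'log created'
theorem loopA_true (xs : List String) (k : Nat) (hk : k ≤ 20) :
    isLogfileLoopA xs k true = (xs.take (21 - k)).any (fun s => PySem.Str.startswith s "log created") := by
  induction xs generalizing k with
  | nil => simp [isLogfileLoopA]
  | cons s rest ih =>
    have h1 : 21 - k = (20 - k) + 1 := by omega
    rw [h1, List.take_succ_cons, List.any_cons]
    simp only [isLogfileLoopA, Bool.true_and, ite_self]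
    cases hp : PySem.Str.startswith s "log created" with
    | true => rw [if_pos rfl, Bool.true_or]
    | false =>
      rw [if_neg Bool.false_ne_true, Bool.false_or]
      by_cases h20 : k = 20
      · subst h20
        rw [if_pos (by decide)]
        simp
      · rw [if_neg (by simp [h20]), ih (k + 1) (by omega)]
        have h2 : 21 - (k + 1) = 20 - k := by omega
        rw [h2]

-- before the flag is set, A equals B's search-then-scan over the remaining window
theorem loopA_false (xs : List String) (k : Nat) (hk : k ≤ 20) :
    isLogfileLoopA xs k false =
      (match findCmdIdx (xs.take (21 - k)) 0 with
       | none => false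
       | some j => ((xs.take (21 - k)).drop (j + 1)).any (fun s => PySem.Str.startswith s "log created")) := by
  induction xs generalizing k with
  | nil => simp [isLogfileLoopA, findCmdIdx]
  | cons s rest ih =>
    have h1 : 21 - k = (20 - k) + 1 := by omega
    rw [h1, List.take_succ_cons]
    simp only [isLogfileLoopA, Bool.false_and, findCmdIdx]
    rw [if_neg Bool.false_ne_true]
    cases hc : PySem.Str.startswith s "Command : cdc run" with
    | true =>
      rw [if_pos rfl, if_pos rfl]
      by_cases h20 : k = 20
      · subst h20
        rw [if_pos (by decide)]
        simp
      · rw [if_neg (by simp [h20]), loopA_true rest (k + 1) (by omega)]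
        have h2 : 21 - (k + 1) = 20 - k := by omega
        rw [h2]
        simp
    | false =>
      simp only [if_neg Bool.false_ne_true]
      by_cases h20 : k = 20
      · subst h20
        rw [if_pos (by decide)]
        simp [findCmdIdx]
      · rw [if_neg (by simp [h20]), ih (k + 1) (by omega)]
        have h2 : 21 - (k + 1) = 20 - k := by omega
        rw [h2, findCmdIdx_succ]
        cases findCmdIdx (rest.take (20 - k)) 0 with
        | none => rfl
        | some j => simp

-- ===== VERDICT (by name: the statement is the Claim_ definition above) =====
theorem is_logfile_spec : Claim_equal_is_logfile := by
  intro lFile _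
  unfold Spec_is_logfile is_logfile is_logfile_alt
  rw [loopA_false lFile 0 (by omega)]
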